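-- pv_equiv track=rewrite | github.com/Dagobert42/Prompt-Based-Data-Augmentation-for-Semantic-Frames | helpers/dataset_processing.py | count_label_appearance
-- ===== SOURCE A (Python) =====
-- def count_label_appearance(all_labels, label_list):
--     counts = {}
--     for labels in all_labels:
--         for l in label_list:
--             if l in labels:
--                 try:
--                     counts[l] += 1
--                 except:
--                     counts[l] = 1
--     return counts
-- ===== SOURCE B (Python) =====
-- def count_label_appearance(all_labels, label_list):
--     # multiplicity of each target label (insertion order = first occurrence)
--     mult = {}
--     for l in label_list:
--         mult[l] = mult.get(l, 0) + 1
--     # number of collections in which each target label appears (dedup'd probes, set membership)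
--     appear = {}
--     for labels in all_labels:
--         s = set(labels)
--         for l in mult:
--             if l in s:
--                 appear[l] = appear.get(l, 0) + 1
--     return {l: n * mult[l] for l, n in appear.items()}
-- ===== Notes on version B (the rewrite author's own statement) =====
-- stated objective: faster
-- what changed: B builds a multiplicity index of label_list once, probes each collection (as a set) only with the deduplicated target labels, and multiplies appearance counts by multiplicity in a final pass, instead of A's scan of every label_list occurrence against every collection list.
import Mathlib
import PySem

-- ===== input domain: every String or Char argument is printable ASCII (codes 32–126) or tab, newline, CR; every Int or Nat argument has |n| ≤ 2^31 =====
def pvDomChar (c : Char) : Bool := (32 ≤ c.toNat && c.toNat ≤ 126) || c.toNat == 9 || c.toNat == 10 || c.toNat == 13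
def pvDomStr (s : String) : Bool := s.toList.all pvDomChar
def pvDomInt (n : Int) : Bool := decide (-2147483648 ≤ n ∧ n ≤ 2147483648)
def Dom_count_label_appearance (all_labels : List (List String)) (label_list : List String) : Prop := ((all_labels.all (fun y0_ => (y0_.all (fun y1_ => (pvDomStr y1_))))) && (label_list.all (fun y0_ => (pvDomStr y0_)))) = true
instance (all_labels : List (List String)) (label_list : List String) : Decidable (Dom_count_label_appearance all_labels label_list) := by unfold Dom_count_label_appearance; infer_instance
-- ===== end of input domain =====

-- B replaces A's per-collection scan of every label_list occurrence by a multiplicity index built once,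
-- deduplicated probes against a per-collection set, and a final multiply pass (objective: faster by constant factor).

-- ===== PORT A =====
def count_label_appearance (all_labels : List (List String)) (label_list : List String) : List (String × Int) :=
  (all_labels.foldl (fun counts labels =>
      label_list.foldl (fun counts l =>
        if labels.contains l then counts.insert l (counts.getD l 0 + 1) else counts) counts)
    PySem.Dict.empty).items

-- ===== PORT B =====
def count_label_appearance_alt (all_labels : List (List String)) (label_list : List String) : List (String × Int) :=
  let mult : PySem.Dict String Int :=
    label_list.foldl (fun d l => d.insert l (d.getD l 0 + 1)) PySem.Dict.empty
  let appear : PySem.Dict String Int :=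
    all_labels.foldl (fun ap labels =>
        let s : PySem.Set String := PySem.Set.ofList labels
        mult.keys.foldl (fun ap l => if s.contains l then ap.insert l (ap.getD l 0 + 1) else ap) ap)
      PySem.Dict.empty
  (PySem.Dict.ofList (appear.items.map (fun p => (p.1, p.2 * mult.getD p.1 0)))).items

-- ===== PRECONDITION & SPEC =====
def Spec_count_label_appearance (all_labels : List (List String)) (label_list : List String) (out : List (String × Int)) : Prop := out = count_label_appearance_alt all_labels label_list
instance (all_labels : List (List String)) (label_list : List String) (out : List (String × Int)) : Decidable (Spec_count_label_appearance all_labels label_list out) := by unfold Spec_count_label_appearance; infer_instance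

-- ===== CLAIM (what is proved, stated in full; the proofs are below) =====
def Claim_equal_count_label_appearance : Prop := ∀ (all_labels : List (List String)) (label_list : List String), Dom_count_label_appearance all_labels label_list → Spec_count_label_appearance all_labels label_list (count_label_appearance all_labels label_list)

-- ===== LEMMAS AND PROOFS =====

-- the sequence of hits A's nested loop inserts/bumps, in order
def pvBlockA (L labels : List String) : List String := L.filter (fun l => labels.contains l)
def pvHitsA (all_labels : List (List String)) (L : List String) : List String := all_labels.flatMap (pvBlockA L)
-- the sequence of hits B's nested loop inserts/bumps, in order (deduplicated probes)
def pvBlockB (L labels : List String) : List String := (PySem.Set.ofList L).filter (fun l => labels.contains l)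
def pvHitsB (all_labels : List (List String)) (L : List String) : List String := all_labels.flatMap (pvBlockB L)

lemma pv_contains_ofList (labels : List String) (l : String) :
    (PySem.Set.ofList labels).contains l = labels.contains l := by
  by_cases h : l ∈ labels <;>
    simp [PySem.Set.contains_eq_listContains, h, PySem.Set.mem_ofList]

-- A's dict is the counter of its hit sequence
lemma pv_A_char (all_labels : List (List String)) (L : List String) :
    count_label_appearance all_labels L = (PySem.Dict.counter (pvHitsA all_labels L)).items := by
  unfold count_label_appearance pvHitsA pvBlockA
  rw [← PySem.Dict.foldl_insert_getD_add_one_eq_counter, List.foldl_flatMap]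
  simp only [PySem.List.foldl_if_eq_foldl_filter]

-- a dict built from pairs with distinct keys lists exactly those pairs
lemma pv_items_ofList (pairs : List (String × Int)) (h : (pairs.map Prod.fst).Nodup) :
    (PySem.Dict.ofList pairs).items = pairs := by
  have h1 : ∀ a ∈ pairs, (PySem.Dict.empty : PySem.Dict String Int).contains a.1 = false :=
    fun a _ => PySem.Dict.contains_empty _
  have h2 := PySem.Dict.items_foldl_insert_fresh pairs Prod.fst Prod.snd PySem.Dict.empty h1 h
  simpa [PySem.Dict.ofList, PySem.Dict.update] using h2

-- B's result is the counter of its hit sequence, values multiplied by the label_list multiplicity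
lemma pv_B_char (all_labels : List (List String)) (L : List String) :
    count_label_appearance_alt all_labels L =
      (PySem.Dict.counter (pvHitsB all_labels L)).items.map
        (fun p => (p.1, p.2 * (L.count p.1 : Int))) := by
  unfold count_label_appearance_alt pvHitsB pvBlockB
  simp only []
  rw [PySem.Dict.foldl_insert_getD_add_one_eq_counter, PySem.Dict.keys_counter]
  simp only [PySem.List.foldl_if_eq_foldl_filter, pv_contains_ofList]
  rw [← List.foldl_flatMap, PySem.Dict.foldl_insert_getD_add_one_eq_counter]
  simp only [PySem.Dict.getD_counter]
  have hn : (((PySem.Dict.counter (all_labels.flatMap (fun labels =>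
      List.filter (fun l => labels.contains l) (PySem.Set.ofList L)))).items.map
      (fun p : String × Int => (p.1, p.2 * (L.count p.1 : Int)))).map Prod.fst).Nodup := by
    simp only [PySem.Dict.items_counter, List.map_map, Function.comp_def, List.map_id']
    exact PySem.Set.nodup_ofList _
  exact pv_items_ofList _ hn

-- filtering commutes with Python-style dedup
lemma pv_filter_ofList (p : String → Bool) (L : List String) :
    (PySem.Set.ofList L).filter p = PySem.Set.ofList (L.filter p) := by
  induction L with
  | nil => rfl
  | cons x xs ih =>
    rw [PySem.Set.ofList_cons]
    simp only [List.filter_cons]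
    have hcomm : ((PySem.Set.ofList xs).discard x).filter p
        = PySem.Set.discard ((PySem.Set.ofList xs).filter p) x := by
      simp [PySem.Set.discard, List.filter_filter, Bool.and_comm]
    by_cases h : p x
    · rw [if_pos h, if_pos h, PySem.Set.ofList_cons, hcomm, ih]
    · rw [if_neg h, if_neg h, hcomm, ih]
      refine List.filter_eq_self.mpr (fun y hy => ?_)
      have hyx : y ≠ x := by
        rintro rfl
        exact h (List.mem_filter.mp ((PySem.Set.mem_ofList _ _).mp hy)).2
      simpa using hyx

-- the two hit sequences have the same first-occurrence dedup
lemma pv_ofList_block (L b : List String) :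
    PySem.Set.ofList (pvBlockB L b) = PySem.Set.ofList (pvBlockA L b) := by
  unfold pvBlockA pvBlockB
  rw [pv_filter_ofList]
  exact PySem.Set.ofList_eq_self_of_nodup _ (PySem.Set.nodup_ofList _)

lemma pv_F1 (all_labels : List (List String)) (L : List String) :
    ∀ s : PySem.Set String, s.update (pvHitsB all_labels L) = s.update (pvHitsA all_labels L) := by
  induction all_labels with
  | nil => intro s; rfl
  | cons b bs ih =>
    intro s
    simp only [pvHitsA, pvHitsB, List.flatMap_cons, PySem.Set.update_append] at *
    rw [show s.update (pvBlockB L b) = s.update (pvBlockA L b) by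
      rw [PySem.Set.update_eq_append_filter, PySem.Set.update_eq_append_filter, pv_ofList_block]]
    exact ih _

lemma pv_F1' (all_labels : List (List String)) (L : List String) :
    PySem.Set.ofList (pvHitsB all_labels L) = PySem.Set.ofList (pvHitsA all_labels L) := by
  have h := pv_F1 all_labels L PySem.Set.empty
  simpa [PySem.Set.update_nil_left] using h

lemma pv_F2 (all_labels : List (List String)) (L : List String) (k : String) (hk : k ∈ L) :
    (pvHitsA all_labels L).count k = (pvHitsB all_labels L).count k * L.count k := by
  induction all_labels with
  | nil => simp [pvHitsA, pvHitsB]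
  | cons b bs ih =>
    simp only [pvHitsA, pvHitsB, List.flatMap_cons, List.count_append] at *
    have hA : (pvBlockA L b).count k = if b.contains k then L.count k else 0 := by
      unfold pvBlockA
      by_cases h : b.contains k
      · rw [List.count_filter h, if_pos h]
      · rw [if_neg h]
        refine List.count_eq_zero_of_not_mem (fun hmem => ?_)
        exact h ((List.mem_filter.mp hmem).2)
    have hB : (pvBlockB L b).count k = if b.contains k then 1 else 0 := by
      unfold pvBlockB
      by_cases h : b.contains k
      · rw [List.count_filter h, if_pos h]
        exact List.count_eq_one_of_mem (PySem.Set.nodup_ofList L) ((PySem.Set.mem_ofList L k).mpr hk)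
      · rw [if_neg h]
        refine List.count_eq_zero_of_not_mem (fun hmem => ?_)
        exact h ((List.mem_filter.mp hmem).2)
    rw [hA, hB, ih]
    by_cases h : b.contains k
    · rw [if_pos h, if_pos h]; ring
    · rw [if_neg h, if_neg h]; ring

-- ===== VERDICT (by name: the statement is the Claim_ definition above) =====
theorem count_label_appearance_spec : Claim_equal_count_label_appearance := by
  intro all_labels L _
  unfold Spec_count_label_appearance
  rw [pv_A_char, pv_B_char, PySem.Dict.items_counter, PySem.Dict.items_counter,
    List.map_map, pv_F1']
  refine List.map_congr_left (fun k hk => ?_)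
  have hkL : k ∈ L := by
    have hmem := (PySem.Set.mem_ofList _ k).mp hk
    simp only [pvHitsA, pvBlockA, List.mem_flatMap, List.mem_filter] at hmem
    obtain ⟨b, _, hf, _⟩ := hmem
    exact hf
  have h2 := pv_F2 all_labels L k hkL
  simp [h2]
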